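-- pv_equiv track=rewrite | github.com/logankm02/robotics-final-proj | build/realsense_cv/build/lib/realsense_cv/gsam_slide_detect.py | slide_ind_post_process
-- ===== SOURCE A (Python) =====
-- def slide_ind_post_process(detected_slides):
--     # Remove slides that are too close to each other (within 2 slots), will filter out the latter one
--     filtered_slides = []
--     i=0
--     while i < len(detected_slides):
--         filtered_slides.append(detected_slides[i])
--         j = i + 1
--         while j < len(detected_slides) and detected_slides[j] <= detected_slides[i] + 2:
--             j += 1
--         i = j
--
--     return filtered_slides
-- ===== SOURCE B (Python) =====
-- def slide_ind_post_process(detected_slides):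
--     # Divide and conquer over index ranges: solve each half and thread the
--     # last kept value from the left half into the right half (depth O(log n)).
--     def rec(lo, hi, last):
--         if hi - lo == 1:
--             x = detected_slides[lo]
--             if last is None or x > last + 2:
--                 return [x], x
--             return [], last
--         mid = (lo + hi) // 2
--         left, last = rec(lo, mid, last)
--         right, last = rec(mid, hi, last)
--         return left + right, last
--     if not detected_slides:
--         return []
--     return rec(0, len(detected_slides), None)[0]
-- ===== Notes on version B (the rewrite author's own statement) =====
-- stated objective: alternative
-- what changed: Replaces A's nested index-jumping while loops by a divide-and-conquer over index ranges that solves each half and threads the last kept value from the left half into the right half.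
import Mathlib
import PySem

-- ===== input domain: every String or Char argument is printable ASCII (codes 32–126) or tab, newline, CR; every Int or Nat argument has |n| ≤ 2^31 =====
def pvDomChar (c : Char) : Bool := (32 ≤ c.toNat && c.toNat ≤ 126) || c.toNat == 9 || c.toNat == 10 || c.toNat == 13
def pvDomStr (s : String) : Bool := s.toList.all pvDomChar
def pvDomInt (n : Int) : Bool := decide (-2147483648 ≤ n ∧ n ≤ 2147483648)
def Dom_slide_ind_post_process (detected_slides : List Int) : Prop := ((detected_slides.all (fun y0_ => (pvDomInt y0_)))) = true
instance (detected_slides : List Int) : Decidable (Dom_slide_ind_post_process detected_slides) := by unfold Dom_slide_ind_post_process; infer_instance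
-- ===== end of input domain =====

-- B replaces A's nested index-jumping while loops by a divide-and-conquer over index ranges
-- that threads the last kept value from the left half into the right half (objective: alternative).

-- ===== PORT A =====
-- inner 'while j < len and l[j] <= v + 2: j += 1' (getD default never read while j < len)
def slideInnerA (l : List Int) (v : Int) (j : Nat) : Nat :=
  if j < l.length ∧ l.getD j 0 ≤ v + 2 then slideInnerA l v (j + 1) else j
termination_by l.length - j
decreasing_by omega

theorem slideInnerA_ge (l : List Int) (v : Int) (j : Nat) : j ≤ slideInnerA l v j := by
  unfold slideInnerA
  split
  · have := slideInnerA_ge l v (j + 1); omega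
  · exact le_refl j
termination_by l.length - j
decreasing_by rename_i h; omega

-- outer 'while i < len: append l[i]; i = j'
def slideOuterA (l : List Int) (i : Nat) : List Int :=
  if h : i < l.length then
    l.getD i 0 :: slideOuterA l (slideInnerA l (l.getD i 0) (i + 1))
  else []
termination_by l.length - i
decreasing_by have := slideInnerA_ge l (l.getD i 0) (i + 1); omega

def slide_ind_post_process (detected_slides : List Int) : List Int :=
  slideOuterA detected_slides 0

-- ===== PORT B =====
-- Source B's 'rec(lo, hi, last)': base case is a one-element range; otherwise split at the
-- midpoint, solve the left half, thread its final last-kept value into the right half.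
-- The 'hi ≤ lo + 1' branch is a totality guard only: Source B never calls rec on an empty range.
def slideRecB (ds : List Int) (lo hi : Nat) (last : Option Int) : List Int × Option Int :=
  if hi - lo = 1 then
    let x := ds.getD lo 0
    match last with
    | none => ([x], some x)
    | some k => if x > k + 2 then ([x], some x) else ([], some k)
  else if hi ≤ lo + 1 then ([], last)   -- unreachable for Source B's calls (totality guard)
  else
    let mid := (lo + hi) / 2
    let L := slideRecB ds lo mid last
    let R := slideRecB ds mid hi L.2
    (L.1 ++ R.1, R.2)
termination_by hi - lo
decreasing_by all_goals omega

def slide_ind_post_process_alt (detected_slides : List Int) : List Int :=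
  if detected_slides.isEmpty then []
  else (slideRecB detected_slides 0 detected_slides.length none).1

-- ===== PRECONDITION & SPEC =====
def Spec_slide_ind_post_process (detected_slides : List Int) (out : List Int) : Prop := out = slide_ind_post_process_alt detected_slides
instance (detected_slides : List Int) (out : List Int) : Decidable (Spec_slide_ind_post_process detected_slides out) := by unfold Spec_slide_ind_post_process; infer_instance

-- ===== CLAIM (what is proved, stated in full; the proofs are below) =====
def Claim_equal_slide_ind_post_process : Prop := ∀ (detected_slides : List Int), Dom_slide_ind_post_process detected_slides → Spec_slide_ind_post_process detected_slides (slide_ind_post_process detected_slides)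

-- ===== LEMMAS AND PROOFS =====

-- flat left-to-right rendering of the greedy filter, used only to relate the two ports
def bGo (last : Option Int) (xs : List Int) : List Int :=
  match xs, last with
  | [], _ => []
  | x :: xs, none => x :: bGo (some x) xs
  | x :: xs, some k => if x > k + 2 then x :: bGo (some x) xs else bGo (some k) xs

-- final last-kept state of the same pass
def lastSt (last : Option Int) (xs : List Int) : Option Int :=
  match xs, last with
  | [], _ => last
  | x :: xs, none => lastSt (some x) xs
  | x :: xs, some k => if x > k + 2 then lastSt (some x) xs else lastSt (some k) xs

theorem bGo_append (last : Option Int) (s t : List Int) :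
    bGo last (s ++ t) = bGo last s ++ bGo (lastSt last s) t := by
  induction s generalizing last with
  | nil => simp [bGo, lastSt]
  | cons x xs ih =>
    cases last with
    | none => simp [bGo, lastSt, ih]
    | some k =>
      by_cases h : x > k + 2 <;> simp [bGo, lastSt, h, ih]

theorem lastSt_append (last : Option Int) (s t : List Int) :
    lastSt last (s ++ t) = lastSt (lastSt last s) t := by
  induction s generalizing last with
  | nil => simp [lastSt]
  | cons x xs ih =>
    cases last with
    | none => simp [lastSt, ih]
    | some k =>
      by_cases h : x > k + 2 <;> simp [lastSt, h, ih]

-- the divide-and-conquer computes the flat pass over the slice ds[lo:hi]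
theorem slideRecB_eq (ds : List Int) (lo hi : Nat) (last : Option Int)
    (hlt : lo < hi) (hle : hi ≤ ds.length) :
    slideRecB ds lo hi last
      = (bGo last ((ds.drop lo).take (hi - lo)), lastSt last ((ds.drop lo).take (hi - lo))) := by
  unfold slideRecB
  by_cases h1 : hi - lo = 1
  · have hlo : lo < ds.length := by omega
    have hdrop : ds.drop lo = ds[lo] :: ds.drop (lo + 1) := List.drop_eq_getElem_cons hlo
    have hget : ds.getD lo 0 = ds[lo] := List.getD_eq_getElem ds 0 hlo
    simp only [h1, if_true, hdrop, List.take_succ_cons, List.take_zero, hget]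
    cases last with
    | none => simp [bGo, lastSt]
    | some k => by_cases h : ds[lo] > k + 2 <;> simp [bGo, lastSt, h]
  · have h2 : ¬ hi ≤ lo + 1 := by omega
    simp only [h1, h2, if_false]
    have hmid1 : lo < (lo + hi) / 2 := by omega
    have hmid2 : (lo + hi) / 2 < hi := by omega
    rw [slideRecB_eq ds lo ((lo + hi) / 2) last hmid1 (by omega),
        slideRecB_eq ds ((lo + hi) / 2) hi _ hmid2 hle]
    have hsplit : (ds.drop lo).take (hi - lo)
        = (ds.drop lo).take ((lo + hi) / 2 - lo)
          ++ (ds.drop ((lo + hi) / 2)).take (hi - (lo + hi) / 2) := by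
      have : hi - lo = ((lo + hi) / 2 - lo) + (hi - (lo + hi) / 2) := by omega
      rw [this, List.take_add, List.drop_drop]
      have h3 : lo + ((lo + hi) / 2 - lo) = (lo + hi) / 2 := by omega
      rw [h3]
    rw [hsplit, bGo_append, lastSt_append]
termination_by hi - lo
decreasing_by all_goals omega

-- A's inner skip loop jumps exactly over the elements the flat pass discards
theorem inner_skip (l : List Int) (v : Int) (j : Nat) :
    bGo (some v) (l.drop j) = bGo none (l.drop (slideInnerA l v j)) := by
  unfold slideInnerA
  split
  · rename_i h
    obtain ⟨hj, hle⟩ := h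
    have hdrop : l.drop j = l[j] :: l.drop (j + 1) := List.drop_eq_getElem_cons hj
    have hget : l.getD j 0 = l[j] := List.getD_eq_getElem l 0 hj
    rw [hdrop, bGo]
    have : ¬ l[j] > v + 2 := by rw [← hget]; omega
    simp only [this, if_false]
    exact inner_skip l v (j + 1)
  · rename_i h
    by_cases hj : j < l.length
    · have hgt : l.getD j 0 > v + 2 := by by_contra hc; exact h ⟨hj, by omega⟩
      have hdrop : l.drop j = l[j] :: l.drop (j + 1) := List.drop_eq_getElem_cons hj
      have hget : l.getD j 0 = l[j] := List.getD_eq_getElem l 0 hj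
      rw [hdrop, bGo, bGo]
      rw [hget] at hgt
      simp only [hgt, if_true]
    · rw [List.drop_eq_nil_of_le (by omega)]
      rfl
termination_by l.length - j
decreasing_by rename_i h; omega

theorem outer_eq (l : List Int) (i : Nat) :
    slideOuterA l i = bGo none (l.drop i) := by
  unfold slideOuterA
  split
  · rename_i h
    have hdrop : l.drop i = l[i] :: l.drop (i + 1) := List.drop_eq_getElem_cons h
    have hget : l.getD i 0 = l[i] := List.getD_eq_getElem l 0 h
    have ih := outer_eq l (slideInnerA l (l.getD i 0) (i + 1))
    rw [hdrop, bGo, ih, ← inner_skip l (l.getD i 0) (i + 1), hget]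
  · rename_i h
    rw [List.drop_eq_nil_of_le (by omega), bGo]
termination_by l.length - i
decreasing_by have := slideInnerA_ge l (l.getD i 0) (i + 1); omega

-- ===== VERDICT (by name: the statement is the Claim_ definition above) =====
theorem slide_ind_post_process_spec : Claim_equal_slide_ind_post_process := by
  intro l _
  unfold Spec_slide_ind_post_process slide_ind_post_process slide_ind_post_process_alt
  by_cases hl : l.isEmpty
  · rw [if_pos hl, outer_eq]
    rw [List.isEmpty_iff] at hl
    simp [hl, bGo]
  · rw [if_neg hl]
    rw [List.isEmpty_iff] at hl
    have hlen : 0 < l.length := List.length_pos_iff.mpr hl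
    rw [slideRecB_eq l 0 l.length none hlen (le_refl _), outer_eq]
    simp
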